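-- pv_equiv track=rewrite | github.com/GpNico/prompts | data/lama_shuffle.py | shuffle3
-- ===== SOURCE A (Python) =====
-- from typing import List, Dict
--
-- def shuffle3(dataset: Dict[str, List[Dict[str, str]]]) -> Dict[str, List[Dict[str, str]]]:
--     """
--         Xs from one relation, Ys from another.
--     """
--     predicate_ids = list(dataset.keys())
--
--     # One simple way to do this is to take Ys from Xs predicate_id's next
--
--     # need to save Ys for the zero^th elem
--     elem_zero_Ys = [elem['obj_label'] for elem in dataset[predicate_ids[0]]]
--
--     for k, predicate_id in enumerate(predicate_ids):
--         Ys_predicate_id = predicate_ids[(k+1)%len(predicate_ids)]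
--         length = min(len(dataset[predicate_id]), len(dataset[Ys_predicate_id]))
--         for i in range(length):
--             if k+1 < len(predicate_ids):
--                 dataset[predicate_id][i]['obj_label'] = dataset[Ys_predicate_id][i]['obj_label']
--             else:
--                 dataset[predicate_id][i]['obj_label'] = elem_zero_Ys[i]
--     return dataset
-- ===== SOURCE B (Python) =====
-- def shuffle3(dataset):
--     """Xs from one relation, Ys from another (obj_labels shifted cyclically to the
--     next predicate).  Pure rebuild: returns a fresh dict instead of mutating
--     `dataset` in place; zip() truncates to the shorter column, so no saved
--     zeroth column and no wrap-around special case are needed."""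
--     predicate_ids = list(dataset)
--     n = len(predicate_ids)
--     out = {}
--     for k, pid in enumerate(predicate_ids):
--         rows = dataset[pid]
--         nxt = dataset[predicate_ids[(k + 1) % n]]
--         out[pid] = [dict(r, obj_label=s['obj_label']) for r, s in zip(rows, nxt)] + rows[len(nxt):]
--     return out
-- ===== Notes on version B (the rewrite author's own statement) =====
-- stated objective: simpler
-- what changed: B rebuilds a fresh dict in one uniform pass, pairing each column with the original next column via zip (which truncates to the shorter length), eliminating A's in-place mutation, its saved zeroth column and the wrap-around if/else inside the index loop; A mutates dataset in place while B does not (equivalence is about the return value).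
-- outside the precondition, e.g. on shuffle3({}): A raises IndexError, B returns {}
import Mathlib
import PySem

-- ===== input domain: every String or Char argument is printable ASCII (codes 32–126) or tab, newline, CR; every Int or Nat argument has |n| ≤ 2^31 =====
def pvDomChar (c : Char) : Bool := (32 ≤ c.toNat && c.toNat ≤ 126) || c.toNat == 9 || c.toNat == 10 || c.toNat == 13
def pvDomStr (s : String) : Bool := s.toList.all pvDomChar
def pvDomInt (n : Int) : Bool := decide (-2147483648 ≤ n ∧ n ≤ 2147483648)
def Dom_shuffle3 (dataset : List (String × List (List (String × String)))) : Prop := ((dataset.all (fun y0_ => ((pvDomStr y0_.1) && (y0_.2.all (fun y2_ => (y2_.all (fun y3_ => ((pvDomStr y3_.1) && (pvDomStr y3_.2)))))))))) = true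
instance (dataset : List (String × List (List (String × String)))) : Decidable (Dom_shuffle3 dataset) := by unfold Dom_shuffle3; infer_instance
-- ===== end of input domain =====

-- B rebuilds the dict in one uniform pass with zip truncation instead of A's in-place
-- mutation with a saved zeroth column and a wrap-around if/else; equivalence is about the
-- RETURN value (the Python A mutates `dataset` in place, B does not).

-- ===== PORT A =====
-- shared one-liners for e['obj_label'] (KeyError ↦ getD "", excluded by Pre_) and the
-- write  row['obj_label'] = v  (overwrite in place / append)
def pvLabel (r : List (String × String)) : String :=
  ((PySem.Dict.mk r).get? "obj_label").getD ""
def pvWrite (r : List (String × String)) (v : String) : List (String × String) :=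
  ((PySem.Dict.mk r).insert "obj_label" v).items

def shuffle3 (dataset : List (String × List (List (String × String)))) : List (String × List (List (String × String))) :=
  let d0 : PySem.Dict String (List (List (String × String))) := PySem.Dict.mk dataset
  let predicate_ids := d0.keys
  -- elem_zero_Ys = [elem['obj_label'] for elem in dataset[predicate_ids[0]]]
  let elem_zero_Ys := ((d0.get? ((PySem.List.pyGet? predicate_ids 0).getD "")).getD []).map pvLabel
  ((PySem.List.enumerate predicate_ids).foldl (fun ds kp =>
      let ys_pid := (PySem.List.pyGet? predicate_ids (PySem.Int.mod (kp.1 + 1) (predicate_ids.length : Int))).getD ""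
      let length := min ((ds.get? kp.2).getD []).length ((ds.get? ys_pid).getD []).length
      (List.range length).foldl (fun ds i =>
          let v := if kp.1 + 1 < (predicate_ids.length : Int)
            then pvLabel (((ds.get? ys_pid).getD []).getD i [])
            else elem_zero_Ys.getD i ""
          ds.modify kp.2 [] (fun rows => rows.set i (pvWrite (rows.getD i []) v))) ds) d0).items

-- ===== PORT B =====
def shuffle3_alt (dataset : List (String × List (List (String × String)))) : List (String × List (List (String × String))) :=
  let d0 : PySem.Dict String (List (List (String × String))) := PySem.Dict.mk dataset
  let predicate_ids := d0.keys
  let n := predicate_ids.length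
  ((PySem.List.enumerate predicate_ids).foldl (fun out kp =>
      let rows := (d0.get? kp.2).getD []
      let nxt := (d0.get? ((PySem.List.pyGet? predicate_ids (PySem.Int.mod (kp.1 + 1) (n : Int))).getD "")).getD []
      out.insert kp.2
        (((rows.zip nxt).map (fun rs => pvWrite rs.1 (pvLabel rs.2))) ++ PySem.List.slice rows (some (nxt.length : Int)))
    ) PySem.Dict.empty).items

-- ===== PRECONDITION & SPEC =====
-- Pre_ = exactly the inputs where the Python A returns: a nonempty dict (empty → IndexError on
-- predicate_ids[0]) whose zeroth column is fully labelled with 'obj_label' and whose other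
-- columns are labelled on the prefix A reads (else KeyError); duplicate top-level keys cannot
-- occur in a Python dict, so key-Nodup excludes no real input.
def Pre_shuffle3 (dataset : List (String × List (List (String × String)))) : Prop :=
  dataset ≠ [] ∧ (dataset.map Prod.fst).Nodup ∧
  (∀ r ∈ dataset.headI.2, (PySem.Dict.mk r).contains "obj_label" = true) ∧
  (∀ p ∈ dataset.zip dataset.tail,
     ∀ r ∈ p.2.2.take (min p.1.2.length p.2.2.length), (PySem.Dict.mk r).contains "obj_label" = true)
instance (dataset : List (String × List (List (String × String)))) : Decidable (Pre_shuffle3 dataset) := by unfold Pre_shuffle3; infer_instance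

def pvWitness_shuffle3 : (List (String × List (List (String × String)))) :=
  [("P1", [[("obj_label", "a")], [("obj_label", "b"), ("x", "y")]]), ("P2", [[("obj_label", "c")]])]

def Spec_shuffle3 (dataset : List (String × List (List (String × String)))) (out : List (String × List (List (String × String)))) : Prop := out = shuffle3_alt dataset
instance (dataset : List (String × List (List (String × String)))) (out : List (String × List (List (String × String)))) : Decidable (Spec_shuffle3 dataset out) := by unfold Spec_shuffle3; infer_instance

-- ===== CLAIM (what is proved, stated in full; the proofs are below) =====
def Claim_equal_shuffle3 : Prop := ∀ (dataset : List (String × List (List (String × String)))), Dom_shuffle3 dataset → Pre_shuffle3 dataset → Spec_shuffle3 dataset (shuffle3 dataset)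

-- ===== LEMMAS AND PROOFS =====

def pvCol (d : List (String × List (List (String × String)))) (k : Nat) : List (List (String × String)) :=
  (d.getD k ("", [])).2
def pvSpecCol (rows nxt : List (List (String × String))) : List (List (String × String)) :=
  ((rows.zip nxt).map (fun rs => pvWrite rs.1 (pvLabel rs.2))) ++ rows.drop nxt.length
def pvTarget (d : List (String × List (List (String × String)))) : List (String × List (List (String × String))) :=
  (List.range d.length).map (fun k => ((d.getD k ("", [])).1, pvSpecCol (pvCol d k) (pvCol d ((k + 1) % d.length))))

theorem pv_get?_at (L : List (String × List (List (String × String))))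
    (hnd : (L.map Prod.fst).Nodup) (m : Nat) (hm : m < L.length) :
    (PySem.Dict.mk L).get? (L[m].1) = some (L[m].2) := by
  apply PySem.Dict.get?_of_mem_items
  · exact (Prod.mk.eta (p := L[m])) ▸ List.getElem_mem hm
  · simpa [PySem.Dict.keys_mk] using hnd

theorem pv_alt (d : List (String × List (List (String × String))))
    (hne : d ≠ []) (hnd : (d.map Prod.fst).Nodup) : shuffle3_alt d = pvTarget d := by
  have hn : 0 < d.length := List.length_pos_iff.mpr hne
  unfold shuffle3_alt
  simp only []
  rw [PySem.Dict.items_foldl_insert_fresh (PySem.List.enumerate (PySem.Dict.mk d).keys)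
      (fun kp => kp.2) _ PySem.Dict.empty (by intro a _; simp)
      (by simpa [PySem.List.map_snd_enumerate, PySem.Dict.keys_mk] using hnd)]
  rw [show (PySem.Dict.empty : PySem.Dict String (List (List (String × String)))).items = [] from rfl, List.nil_append]
  apply List.ext_getElem
  · simp [PySem.List.length_enumerate, pvTarget]
  · intro k hk hk2
    simp only [List.getElem_map, PySem.List.getElem_enumerate]
    have hklen : k < d.length := by simpa [pvTarget] using hk2
    have hmlen : (k+1) % d.length < d.length := Nat.mod_lt _ hn
    simp only [PySem.Dict.keys_mk, List.length_map]
    have hcast : (0 + (k:Int) + 1) = ((k+1 : Nat) : Int) := by push_cast; ring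
    rw [hcast, PySem.Int.mod_natCast, PySem.List.pyGet?_natCast,
        List.getElem?_eq_getElem (by simpa using hmlen)]
    simp only [Option.getD_some, List.getElem_map]
    rw [pv_get?_at d hnd k hklen, pv_get?_at d hnd ((k+1)%d.length) hmlen]
    simp only [Option.getD_some]
    rw [PySem.List.slice_from _ (by positivity)]
    simp [pvTarget, pvSpecCol, pvCol, List.getD_eq_getElem?_getD,
          List.getElem?_eq_getElem hklen, List.getElem?_eq_getElem hmlen]

def pvStepA (d : List (String × List (List (String × String))))
    (ds : PySem.Dict String (List (List (String × String)))) (kp : Int × String) :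
    PySem.Dict String (List (List (String × String))) :=
  let predicate_ids := (PySem.Dict.mk d).keys
  let elem_zero_Ys := (((PySem.Dict.mk d).get? ((PySem.List.pyGet? predicate_ids 0).getD "")).getD []).map pvLabel
  let ys_pid := (PySem.List.pyGet? predicate_ids (PySem.Int.mod (kp.1 + 1) (predicate_ids.length : Int))).getD ""
  let length := min ((ds.get? kp.2).getD []).length ((ds.get? ys_pid).getD []).length
  (List.range length).foldl (fun ds i =>
      let v := if kp.1 + 1 < (predicate_ids.length : Int)
        then pvLabel (((ds.get? ys_pid).getD []).getD i [])
        else elem_zero_Ys.getD i ""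
      ds.modify kp.2 [] (fun rows => rows.set i (pvWrite (rows.getD i []) v))) ds

theorem pv_shuffle3_eq_fold (d : List (String × List (List (String × String)))) :
    shuffle3 d = ((PySem.List.enumerate ((PySem.Dict.mk d).keys)).foldl (pvStepA d) (PySem.Dict.mk d)).items := rfl

theorem pv_get?_mid (L1 L2 : List (String × List (List (String × String))))
    (p : String) (v : List (List (String × String)))
    (h1 : ∀ q ∈ L1, q.1 ≠ p) :
    (PySem.Dict.mk (L1 ++ (p, v) :: L2)).get? p = some v := by
  simp only [PySem.Dict.get?]
  rw [List.find?_append]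
  have : L1.find? (fun q => q.1 == p) = none := by
    rw [List.find?_eq_none]
    intro q hq
    simpa using h1 q hq
  simp [this]

theorem pv_insert_mid (L1 L2 : List (String × List (List (String × String))))
    (p : String) (v w : List (List (String × String)))
    (h1 : ∀ q ∈ L1, q.1 ≠ p) (h2 : ∀ q ∈ L2, q.1 ≠ p) :
    (PySem.Dict.mk (L1 ++ (p, v) :: L2)).insert p w = PySem.Dict.mk (L1 ++ (p, w) :: L2) := by
  have hc : (PySem.Dict.mk (L1 ++ (p, v) :: L2)).contains p = true := by
    simp [PySem.Dict.contains]
  simp only [PySem.Dict.insert, hc, if_pos]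
  congr 1
  rw [List.map_append]
  congr 1
  · conv_rhs => rw [← List.map_id L1]
    exact List.map_congr_left (fun q hq => by simp [h1 q hq])
  · simp only [List.map_cons, beq_self_eq_true, if_pos]
    congr 1
    conv_rhs => rw [← List.map_id L2]
    exact List.map_congr_left (fun q hq => by simp [h2 q hq])

theorem pv_nodup_split (L1 L2 : List (String × List (List (String × String))))
    (p : String) (v : List (List (String × String)))
    (hnd : ((L1 ++ (p, v) :: L2).map Prod.fst).Nodup) :
    (∀ q ∈ L1, q.1 ≠ p) ∧ (∀ q ∈ L2, q.1 ≠ p) := by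
  simp only [List.map_append, List.map_cons, List.nodup_append, List.nodup_cons] at hnd
  obtain ⟨h1, h2, h3⟩ := hnd
  constructor
  · rintro ⟨a, b⟩ hq heq
    exact h3 a (List.mem_map_of_mem hq) p (List.mem_cons_self) heq
  · rintro ⟨a, b⟩ hq heq
    cases heq
    exact h2.1 (List.mem_map_of_mem hq)

theorem pv_inner (val : PySem.Dict String (List (List (String × String))) → Nat → String)
    (w : Nat → String) (p : String)
    (L1 L2 : List (String × List (List (String × String))))
    (rows : List (List (String × String)))
    (hnd : ((L1 ++ (p, rows) :: L2).map Prod.fst).Nodup)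
    (m : Nat) (hm : m ≤ rows.length)
    (hval : ∀ (mid : List (List (String × String))), mid.length = rows.length → ∀ i, i < m →
        val (PySem.Dict.mk (L1 ++ (p, mid) :: L2)) i = w i) :
    (List.range m).foldl
        (fun ds i => ds.modify p [] (fun rs => rs.set i (pvWrite (rs.getD i []) (val ds i))))
        (PySem.Dict.mk (L1 ++ (p, rows) :: L2))
      = PySem.Dict.mk (L1 ++ (p, rows.mapIdx (fun i r => if i < m then pvWrite r (w i) else r)) :: L2) := by
  obtain ⟨h1, h2⟩ := pv_nodup_split L1 L2 p rows hnd
  induction m with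
  | zero =>
    simp only [List.range_zero, List.foldl_nil]
    have : rows.mapIdx (fun i r => if i < 0 then pvWrite r (w i) else r) = rows := by
      apply List.ext_getElem <;> simp
    rw [this]
  | succ m ih =>
    rw [List.range_succ, List.foldl_append]
    rw [ih (Nat.le_of_succ_le hm) (fun mid hl i hi => hval mid hl i (Nat.lt_succ_of_lt hi))]
    set mid := rows.mapIdx (fun i r => if i < m then pvWrite r (w i) else r) with hmid
    have hmidlen : mid.length = rows.length := by simp [hmid]
    simp only [List.foldl_cons, List.foldl_nil]
    rw [show ∀ (dd : PySem.Dict String (List (List (String × String)))) f, dd.modify p [] f = dd.insert p (f (dd.getD p [])) from fun _ _ => rfl]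
    rw [PySem.Dict.getD_eq_get?_getD, pv_get?_mid L1 L2 p mid h1]
    rw [hval mid hmidlen m (Nat.lt_succ_self m)]
    rw [pv_insert_mid L1 L2 p mid _ h1 h2]
    rw [Option.getD_some]
    have hmrows : m < rows.length := hm
    have hgd : mid.getD m [] = rows[m] := by
      rw [List.getD_eq_getElem?_getD, List.getElem?_eq_getElem (by simp [hmid]; omega)]
      simp [hmid, List.getElem_mapIdx]
    have hXY : mid.set m (pvWrite (mid.getD m []) (w m))
        = rows.mapIdx (fun i r => if i < m + 1 then pvWrite r (w i) else r) := by
      rw [hgd]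
      apply List.ext_getElem
      · simp [hmid]
      · intro i hi1 hi2
        simp only [List.getElem_set, hmid, List.getElem_mapIdx]
        rcases Nat.lt_trichotomy i m with h | h | h
        · simp [Nat.ne_of_gt h, h, Nat.lt_succ_of_lt h]
        · simp [h]
        · have hh1 : ¬ i < m := by omega
          have hh2 : ¬ i < m + 1 := by omega
          simp [Nat.ne_of_lt h, hh1, hh2]
    rw [hXY]

theorem pv_mapIdx_spec (rows nxt : List (List (String × String))) :
    rows.mapIdx (fun i r => if i < min rows.length nxt.length then pvWrite r (pvLabel (nxt.getD i [])) else r)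
      = pvSpecCol rows nxt := by
  apply List.ext_getElem
  · simp [pvSpecCol]; omega
  · intro i hi1 hi2
    simp only [List.getElem_mapIdx]
    have hir : i < rows.length := by simpa using hi1
    by_cases h : i < min rows.length nxt.length
    · have hin : i < nxt.length := by omega
      have hzl : i < ((rows.zip nxt).map (fun rs => pvWrite rs.1 (pvLabel rs.2))).length := by
        simp; omega
      rw [if_pos h]
      show _ = (pvSpecCol rows nxt)[i]'hi2
      unfold pvSpecCol
      rw [List.getElem_append_left hzl]
      simp [List.getElem_zip, List.getD_eq_getElem?_getD, List.getElem?_eq_getElem hin]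
    · have hn : nxt.length < rows.length := by omega
      have hmin : min rows.length nxt.length = nxt.length := by omega
      have hzl : ((rows.zip nxt).map (fun rs => pvWrite rs.1 (pvLabel rs.2))).length = nxt.length := by
        simp; omega
      rw [if_neg h]
      show _ = (pvSpecCol rows nxt)[i]'hi2
      unfold pvSpecCol
      rw [List.getElem_append_right (by simp; omega)]
      simp only [hzl, List.getElem_drop]
      congr 1
      omega

theorem pv_target_length (d : List (String × List (List (String × String)))) :
    (pvTarget d).length = d.length := by simp [pvTarget]

theorem pv_target_getElem (d : List (String × List (List (String × String))))
    (k : Nat) (hk : k < d.length) :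
    (pvTarget d)[k]'(by simp [pv_target_length, hk]) =
      (d[k].1, pvSpecCol (d[k].2) ((d[(k+1) % d.length]'(Nat.mod_lt _ (by omega))).2)) := by
  have hm : (k+1) % d.length < d.length := Nat.mod_lt _ (by omega)
  simp [pvTarget, pvCol, List.getD_eq_getElem?_getD, List.getElem?_eq_getElem hk,
        List.getElem?_eq_getElem hm]

theorem pv_shape_fst (d : List (String × List (List (String × String)))) (j : Nat) :
    ((pvTarget d).take j ++ d.drop j).map Prod.fst = d.map Prod.fst := by
  have hfst : (pvTarget d).map Prod.fst = d.map Prod.fst := by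
    apply List.ext_getElem
    · simp [pv_target_length]
    · intro k h1 h2
      have hk : k < d.length := by simpa using h2
      simp only [List.getElem_map]
      rw [pv_target_getElem d k hk]
  rw [List.map_append, List.map_take, List.map_drop, hfst, List.take_append_drop]

theorem pv_length_specCol (rows nxt : List (List (String × String))) :
    (pvSpecCol rows nxt).length = rows.length := by
  simp [pvSpecCol]; omega

theorem pv_getD_map_label (l : List (List (String × String))) (i : Nat) (h : i < l.length) :
    (l.map pvLabel).getD i "" = pvLabel (l.getD i []) := by
  rw [List.getD_eq_getElem?_getD, List.getD_eq_getElem?_getD, List.getElem?_map,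
      List.getElem?_eq_getElem h]
  simp

theorem pv_shape_len (d : List (String × List (List (String × String))))
    (j m : Nat) (hj : j ≤ d.length) (hm : m < d.length) :
    (((pvTarget d).take j ++ d.drop j)[m]'(by simp [pv_target_length]; omega)).1 = d[m].1 ∧
    (((pvTarget d).take j ++ d.drop j)[m]'(by simp [pv_target_length]; omega)).2.length = d[m].2.length := by
  by_cases h : m < j
  · rw [List.getElem_append_left (by simp [pv_target_length]; omega)]
    rw [List.getElem_take, pv_target_getElem d m hm]
    exact ⟨rfl, pv_length_specCol _ _⟩
  · rw [List.getElem_append_right (by simp [pv_target_length]; omega)]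
    have : (d.drop j)[m - (List.take j (pvTarget d)).length]'(by simp [pv_target_length]; omega) = d[m] := by
      rw [List.getElem_drop]
      congr 1
      simp [pv_target_length]
      omega
    rw [this]
    exact ⟨rfl, rfl⟩

theorem pv_shape_get_ge (d : List (String × List (List (String × String))))
    (j m : Nat) (_hj : j ≤ d.length) (hm : m < d.length) (h : j ≤ m) :
    ((pvTarget d).take j ++ d.drop j)[m]'(by simp [pv_target_length]; omega) = d[m] := by
  rw [List.getElem_append_right (by simp [pv_target_length]; omega)]
  rw [List.getElem_drop]
  congr 1
  simp [pv_target_length]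
  omega


theorem pv_fst_ne (d : List (String × List (List (String × String))))
    (hnd : (d.map Prod.fst).Nodup) (a b : Nat) (ha : a < d.length) (hb : b < d.length)
    (hab : a ≠ b) : d[a].1 ≠ d[b].1 := by
  intro h
  have h1 : (d.map Prod.fst)[a]'(by simpa using ha) = (d.map Prod.fst)[b]'(by simpa using hb) := by
    simpa using h
  exact hab (hnd.getElem_inj_iff.mp h1)

theorem pv_take_target_ne (d : List (String × List (List (String × String))))
    (hnd : (d.map Prod.fst).Nodup) (j m : Nat) (_hj : j ≤ d.length) (hm : m < d.length)
    (hjm : j ≤ m) : ∀ q ∈ (pvTarget d).take j, q.1 ≠ d[m].1 := by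
  intro q hq
  obtain ⟨i, hi, heq⟩ := List.mem_iff_getElem.mp hq
  have hij : i < j := by
    have h2 := hi
    simp [pv_target_length] at h2
    omega
  have hin : i < d.length := by omega
  have : q = (pvTarget d)[i]'(by simp [pv_target_length]; omega) := by
    rw [← heq, List.getElem_take]
  rw [this, pv_target_getElem d i hin]
  exact pv_fst_ne d hnd i m hin hm (by omega)

theorem pv_get?_skip (L1 L2 : List (String × List (List (String × String)))) (key : String)
    (h1 : ∀ q ∈ L1, q.1 ≠ key) :
    (PySem.Dict.mk (L1 ++ L2)).get? key = (PySem.Dict.mk L2).get? key := by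
  simp only [PySem.Dict.get?]
  rw [List.find?_append]
  have : L1.find? (fun q => q.1 == key) = none := by
    rw [List.find?_eq_none]
    intro q hq
    simpa using h1 q hq
  simp [this]

theorem pv_mid_get_next (d : List (String × List (List (String × String))))
    (hnd : (d.map Prod.fst).Nodup) (j : Nat) (hj1 : j + 1 < d.length)
    (mid : List (List (String × String))) :
    (PySem.Dict.mk ((pvTarget d).take j ++ (d[j].1, mid) :: d.drop (j+1))).get? (d[j+1].1)
      = some (d[j+1].2) := by
  rw [pv_get?_skip _ _ _ (pv_take_target_ne d hnd j (j+1) (by omega) hj1 (by omega))]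
  rw [PySem.Dict.get?_mk_cons]
  rw [if_neg (by simpa using pv_fst_ne d hnd j (j+1) (by omega) hj1 (by omega))]
  rw [List.drop_eq_getElem_cons hj1]
  rw [show d[j+1] = (d[j+1].1, d[j+1].2) from rfl, PySem.Dict.get?_mk_cons]
  simp

theorem pv_step (d : List (String × List (List (String × String))))
    (hnd : (d.map Prod.fst).Nodup)
    (j : Nat) (hj : j < d.length)
    (ds : PySem.Dict String (List (List (String × String))))
    (hds : ds.items = (pvTarget d).take j ++ d.drop j) :
    (pvStepA d ds ((j : Int), d[j].1)).items = (pvTarget d).take (j+1) ++ d.drop (j+1) := by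
  have hn : 0 < d.length := by omega
  have hm' : (j+1) % d.length < d.length := Nat.mod_lt _ hn
  have hjle : j ≤ d.length := le_of_lt hj
  have hds' : ds = PySem.Dict.mk ((pvTarget d).take j ++ d.drop j) := PySem.Dict.ext hds
  subst hds'
  have hndSL : ((((pvTarget d).take j ++ d.drop j)).map Prod.fst).Nodup := by
    rw [pv_shape_fst]; exact hnd
  simp only [pvStepA, PySem.Dict.keys_mk, List.length_map]
  -- resolve predicate_ids[(k+1) % n] and predicate_ids[0]
  have hys : (PySem.List.pyGet? (d.map Prod.fst) (PySem.Int.mod (((j : Int), d[j].1).1 + 1) (d.length : Int))).getD ""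
      = d[(j+1) % d.length].1 := by
    rw [show (((j : Int), d[j].1).1 + 1) = (((j+1 : Nat) : Int)) by push_cast; ring]
    rw [PySem.Int.mod_natCast, PySem.List.pyGet?_natCast, List.getElem?_map,
        List.getElem?_eq_getElem hm']
    simp
  have h0 : (PySem.List.pyGet? (d.map Prod.fst) 0).getD "" = d[0].1 := by
    rw [show (0 : Int) = ((0 : Nat) : Int) from rfl]
    rw [PySem.List.pyGet?_natCast, List.getElem?_map, List.getElem?_eq_getElem hn]
    simp
  rw [hys, h0]
  have hez : ((PySem.Dict.mk d).get? (d[0].1)).getD [] = d[0].2 := by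
    rw [pv_get?_at d hnd 0 hn]; rfl
  rw [hez]
  -- the two lookups deciding `length`
  have hgetp : ((PySem.Dict.mk ((pvTarget d).take j ++ d.drop j)).get? (d[j].1)).getD [] = d[j].2 := by
    have h := pv_get?_at _ hndSL j (by simp [pv_target_length]; omega)
    rw [pv_shape_get_ge d j j hjle hj le_rfl] at h
    rw [h]; rfl
  have hgetm : ((PySem.Dict.mk ((pvTarget d).take j ++ d.drop j)).get? (d[(j+1) % d.length].1)).getD []
      = (((pvTarget d).take j ++ d.drop j)[(j+1) % d.length]'(by simp [pv_target_length]; omega)).2 := by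
    have h := pv_get?_at _ hndSL ((j+1) % d.length) (by simp [pv_target_length]; omega)
    rw [(pv_shape_len d j ((j+1) % d.length) hjle hm').1] at h
    rw [h]; rfl
  rw [hgetp, hgetm]
  rw [(pv_shape_len d j ((j+1) % d.length) hjle hm').2]
  rw [show (List.drop j d) = (d[j].1, d[j].2) :: List.drop (j+1) d from List.drop_eq_getElem_cons hj]
  have hnd2 : (((pvTarget d).take j ++ (d[j].1, d[j].2) :: d.drop (j+1)).map Prod.fst).Nodup := by
    have h := hndSL
    rw [List.drop_eq_getElem_cons hj] at h
    exact h
  have hvalp : ∀ (mid : List (List (String × String))), mid.length = d[j].2.length →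
      ∀ i, i < min d[j].2.length d[(j+1) % d.length].2.length →
      (if (j:Int) + 1 < (d.length : Int)
        then pvLabel ((((PySem.Dict.mk ((pvTarget d).take j ++ (d[j].1, mid) :: d.drop (j+1))).get? (d[(j+1) % d.length].1)).getD []).getD i [])
        else (List.map pvLabel d[0].2).getD i "")
      = pvLabel ((d[(j+1) % d.length].2).getD i []) := by
    intro mid hlen i hi
    by_cases hc : (j:Int) + 1 < (d.length : Int)
    · have hjn : j + 1 < d.length := by exact_mod_cast hc
      have hmod : (j+1) % d.length = j + 1 := Nat.mod_eq_of_lt hjn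
      rw [if_pos hc, getElem_congr rfl hmod hm']
      rw [pv_mid_get_next d hnd j hjn mid]
      simp
    · have hj1 : j + 1 = d.length := by
        have h2 : ¬ ((j:Int) + 1 < (d.length : Int)) := hc
        omega
      have hmod : (j+1) % d.length = 0 := by rw [hj1]; exact Nat.mod_self _
      rw [if_neg hc, getElem_congr rfl hmod hm']
      rw [getElem_congr rfl hmod hm'] at hi
      exact pv_getD_map_label _ i (by omega)
  refine Eq.trans (congrArg PySem.Dict.items
    (pv_inner
      (fun ds i => if (j:Int) + 1 < (d.length : Int)
          then pvLabel (((ds.get? (d[(j+1) % d.length].1)).getD []).getD i [])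
          else (List.map pvLabel d[0].2).getD i "")
      (fun i => pvLabel ((d[(j+1) % d.length].2).getD i []))
      (d[j].1) ((pvTarget d).take j) (d.drop (j+1)) (d[j].2)
      hnd2 (min d[j].2.length d[(j+1) % d.length].2.length) (Nat.min_le_left _ _)
      (fun mid hlen i hi => hvalp mid hlen i hi))) ?_
  show (pvTarget d).take j ++ (d[j].1, _) :: d.drop (j+1) = _
  simp only [pv_mapIdx_spec]
  rw [List.take_add_one, List.getElem?_eq_getElem (by simp [pv_target_length]; omega)]
  rw [pv_target_getElem d j hj]
  simp [List.append_assoc]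

theorem pv_outer (d : List (String × List (List (String × String))))
    (hnd : (d.map Prod.fst).Nodup) :
    ∀ (tl : List String) (j : Nat) (ds : PySem.Dict String (List (List (String × String)))),
      tl = (d.map Prod.fst).drop j →
      ds.items = (pvTarget d).take j ++ d.drop j →
      ((PySem.List.enumerate tl (j : Int)).foldl (pvStepA d) ds).items = pvTarget d := by
  intro tl
  induction tl with
  | nil =>
    intro j ds htl hds
    have hjn : d.length ≤ j := by
      by_contra h
      have := congrArg List.length htl
      simp at this
      omega
    simp only [PySem.List.enumerate, List.foldl_nil]
    rw [hds, List.take_of_length_le (by simp [pv_target_length]; omega),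
        List.drop_of_length_le (by omega), List.append_nil]
  | cons x tl ih =>
    intro j ds htl hds
    have hjn : j < d.length := by
      by_contra h
      rw [List.drop_of_length_le (by simp; omega)] at htl
      simp at htl
    have hx : x = d[j].1 := by
      have h := congrArg (fun l => l.headI) htl
      rw [List.drop_eq_getElem_cons (by simpa using hjn)] at h
      simpa using h
    have htl' : tl = (d.map Prod.fst).drop (j+1) := by
      have h := congrArg List.tail htl
      rw [List.drop_eq_getElem_cons (by simpa using hjn)] at h
      simpa using h
    rw [show PySem.List.enumerate (x :: tl) (j : Int) = ((j : Int), x) :: PySem.List.enumerate tl ((j : Int) + 1) from rfl]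
    rw [List.foldl_cons]
    rw [show ((j : Int) + 1) = (((j + 1 : Nat)) : Int) by push_cast; ring]
    apply ih (j+1)
    · exact htl'
    · rw [hx]
      exact pv_step d hnd j hjn ds hds

theorem pv_main (d : List (String × List (List (String × String))))
    (_hne : d ≠ []) (hnd : (d.map Prod.fst).Nodup) : shuffle3 d = pvTarget d := by
  rw [pv_shuffle3_eq_fold d]
  have h0 : (PySem.Dict.mk d).keys = (d.map Prod.fst).drop 0 := by
    simp [PySem.Dict.keys_mk]
  rw [show ((PySem.List.enumerate ((PySem.Dict.mk d).keys)) : List (Int × String)) = PySem.List.enumerate ((d.map Prod.fst).drop 0) ((0 : Nat) : Int) from by rw [h0]; rfl]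
  exact pv_outer d hnd _ 0 _ rfl (by simp)

-- ===== VERDICT (by name: the statement is the Claim_ definition above) =====
theorem shuffle3_spec : Claim_equal_shuffle3 := by
  intro d _ hpre
  unfold Spec_shuffle3
  rw [pv_main d hpre.1 hpre.2.1, pv_alt d hpre.1 hpre.2.1]
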